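-- pv_equiv track=rewrite | github.com/kaua-stack/calculadoraPhyton | operacao.py | exercicio17
-- ===== SOURCE A (Python) =====
-- def exercicio17(num):
--      primo = ""
--      for i in range(1, num, 1):
--          if i == 2 or i == 3 or i == 5:
--              primo += f'\n{i}'
--          elif num % 2 != 0 and num % 3 != 0 and num % 5 != 0:
--              primo += f'\n{i}'
--      return primo
-- ===== SOURCE B (Python) =====
-- def exercicio17(num):
--     # The elif test depends only on num, so hoist it out of the loop:
--     # if num is not divisible by 2, 3 or 5, every i in range(1, num) is emitted;
--     # otherwise exactly 2, 3, 5 (those below num) are emitted, in that order.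
--     if num % 2 != 0 and num % 3 != 0 and num % 5 != 0:
--         values = range(1, num)
--     else:
--         values = [i for i in (2, 3, 5) if i < num]
--     return ''.join(f'\n{i}' for i in values)
-- ===== Notes on version B (the rewrite author's own statement) =====
-- stated objective: faster
-- what changed: The per-iteration elif test depends only on num, so B hoists it out of the loop: one invariant check picks the emitted values (all of range(1,num), or just [2,3,5] clipped below num) and a single uniform ''.join builds the string.
import Mathlib
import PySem

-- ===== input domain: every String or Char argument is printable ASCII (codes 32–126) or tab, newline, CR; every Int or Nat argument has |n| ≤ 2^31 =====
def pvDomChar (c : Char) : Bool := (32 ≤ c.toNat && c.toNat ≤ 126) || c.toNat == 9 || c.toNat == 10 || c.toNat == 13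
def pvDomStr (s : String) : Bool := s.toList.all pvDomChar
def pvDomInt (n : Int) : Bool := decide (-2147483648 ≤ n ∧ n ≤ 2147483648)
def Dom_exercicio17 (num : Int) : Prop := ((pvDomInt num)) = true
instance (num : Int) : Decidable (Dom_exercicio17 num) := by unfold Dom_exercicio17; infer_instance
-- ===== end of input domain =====

-- B hoists A's loop-invariant elif test on num out of the loop and builds the string with one uniform join (measured faster; O(1) emitted values when num shares a factor with 30).


-- ===== PORT A =====
def exercicio17 (num : Int) : String :=
  (PySem.List.pyRange 1 num 1).foldl
    (fun primo i =>
      if i == 2 || i == 3 || i == 5 then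
        primo ++ ("\n" ++ PySem.Int.toStr i)
      else if PySem.Int.mod num 2 != 0 && PySem.Int.mod num 3 != 0 && PySem.Int.mod num 5 != 0 then
        primo ++ ("\n" ++ PySem.Int.toStr i)
      else primo) ""

-- ===== PORT B =====
def exercicio17_alt (num : Int) : String :=
  let values : List Int :=
    if PySem.Int.mod num 2 != 0 && PySem.Int.mod num 3 != 0 && PySem.Int.mod num 5 != 0 then
      PySem.List.pyRange 1 num 1
    else
      [2, 3, 5].filter (fun i => i < num)
  String.join (values.map (fun i => "\n" ++ PySem.Int.toStr i))

-- ===== PRECONDITION & SPEC =====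
def Spec_exercicio17 (num : Int) (out : String) : Prop := out = exercicio17_alt num
instance (num : Int) (out : String) : Decidable (Spec_exercicio17 num out) := by unfold Spec_exercicio17; infer_instance

-- ===== CLAIM (what is proved, stated in full; the proofs are below) =====
def Claim_equal_exercicio17 : Prop := ∀ (num : Int), Dom_exercicio17 num → Spec_exercicio17 num (exercicio17 num)

-- ===== LEMMAS AND PROOFS =====

theorem pvFoldlStrAppend (l : List String) : ∀ acc : String,
    l.foldl (· ++ ·) acc = acc ++ l.foldl (· ++ ·) "" := by
  induction l with
  | nil => intro acc; simp [List.foldl]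
  | cons s l ih =>
    intro acc
    simp only [List.foldl]
    rw [ih (acc ++ s), ih ("" ++ s)]
    simp [String.append_assoc]

theorem pvFoldlEmit (f : Int → String) (l : List Int) (acc : String) :
    l.foldl (fun p i => p ++ f i) acc = acc ++ String.join (l.map f) := by
  rw [String.join, ← List.foldl_map, pvFoldlStrAppend]

theorem pvFoldlEmitIf (f : Int → String) (p : Int → Bool) (l : List Int) : ∀ acc : String,
    l.foldl (fun s i => if p i then s ++ f i else s) acc
      = acc ++ String.join ((l.filter p).map f) := by
  induction l with
  | nil => intro acc; simp [List.foldl, String.join]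
  | cons a l ih =>
    intro acc
    by_cases h : p a = true
    · simp only [List.foldl, List.filter, h, if_pos, List.map, String.join, List.foldl]
      rw [ih (acc ++ f a)]
      rw [pvFoldlStrAppend ((l.filter p).map f) ("" ++ f a)]
      simp [String.join, String.append_assoc]
    · simp only [List.foldl, List.filter, h, Bool.false_eq_true, if_neg, not_false_iff]
      rw [ih acc]

theorem pvFilterRange (num : Int) :
    (PySem.List.pyRange 1 num 1).filter (fun i => i == 2 || i == 3 || i == 5)
      = ([2, 3, 5] : List Int).filter (fun i => i < num) := by
  by_cases h : num ≤ 1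
  · rw [show PySem.List.pyRange 1 num 1 = [] from by
      simp [List.eq_nil_iff_forall_not_mem, PySem.List.mem_pyRange_one]; omega]
    simp [List.filter, show ¬(2 < num) from by omega, show ¬(3 < num) from by omega,
      show ¬(5 < num) from by omega]
  · by_cases h6 : num ≤ 6
    · interval_cases num <;> decide
    · rw [PySem.List.pyRange_one_append 1 6 num (by omega) (by omega)]
      rw [List.filter_append]
      rw [show (PySem.List.pyRange 6 num 1).filter (fun i => i == 2 || i == 3 || i == 5) = [] from by
        rw [List.filter_eq_nil_iff]
        intro x hx
        have := PySem.List.mem_pyRange_one.mp hx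
        simp only [beq_iff_eq, Bool.or_eq_true, not_or]
        omega]
      rw [show PySem.List.pyRange 1 6 1 = [1, 2, 3, 4, 5] from by decide]
      simp [List.filter, show (2:Int) < num from by omega, show (3:Int) < num from by omega,
        show (5:Int) < num from by omega]

-- ===== VERDICT (by name: the statement is the Claim_ definition above) =====
theorem exercicio17_spec : Claim_equal_exercicio17 := by
  intro num _
  unfold Spec_exercicio17 exercicio17 exercicio17_alt
  by_cases hc : (PySem.Int.mod num 2 != 0 && PySem.Int.mod num 3 != 0 && PySem.Int.mod num 5 != 0) = true
  · simp only [hc, if_true, ite_self]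
    rw [pvFoldlEmit]
    simp
  · rw [if_neg hc]
    have : (fun (primo : String) (i : Int) =>
        if i == 2 || i == 3 || i == 5 then primo ++ ("\n" ++ PySem.Int.toStr i)
        else if PySem.Int.mod num 2 != 0 && PySem.Int.mod num 3 != 0 && PySem.Int.mod num 5 != 0 then
          primo ++ ("\n" ++ PySem.Int.toStr i)
        else primo)
        = fun primo i => if i == 2 || i == 3 || i == 5 then primo ++ ("\n" ++ PySem.Int.toStr i) else primo := by
      funext primo i
      by_cases hi : (i == 2 || i == 3 || i == 5) = true
      · rw [if_pos hi, if_pos hi]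
      · rw [if_neg hi, if_neg hc, if_neg hi]
    rw [this, pvFoldlEmitIf, pvFilterRange]
    simp
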